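-- pv_equiv track=rewrite | github.com/KKosukeee/CodingQuestions | LeetCode/1234_replace_the_substring_for_balanced_string.py | first_solution
-- ===== SOURCE A (Python) =====
-- from collections import Counter
--
-- def first_solution(s):
--     """
--     A first solution that runs O(N) in time and O(1) in space
--
--     :type s: str
--     :rtype: int
--     """
--     counter = Counter(s)
--     target = len(s) // 4
--     j, res = 0, len(s)
--     chars = ('Q', 'R', 'E', 'W')
--     for i in range(len(s)):
--         while j < len(s) and not all(counter[char] <= target for char in chars):
--             counter[s[j]] -= 1
--             j += 1
--         if all(counter[char] <= target for char in chars):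
--             res = min(res, j - i)
--         counter[s[i]] += 1
--     return res
-- ===== SOURCE B (Python) =====
-- def first_solution(s):
--     """Occurrence-index re-implementation: for each left bound i, jump directly
--     to the k-th occurrence of each letter instead of two-pointer scanning."""
--     n = len(s)
--     target = n // 4
--     chars = ('Q', 'R', 'E', 'W')
--     tot = {c: s.count(c) for c in chars}
--     pos = {c: [k for k, ch in enumerate(s) if ch == c] for c in chars}
--     pref = {c: 0 for c in chars}
--     res = n
--     for i in range(n):
--         j = 0
--         feasible = True
--         for c in chars:
--             need = tot[c] + pref[c] - target
--             if need > tot[c]: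
--                 feasible = False
--             elif need > 0:
--                 j = max(j, pos[c][need - 1] + 1)
--         if feasible:
--             res = min(res, j - i)
--         if s[i] in pref:
--             pref[s[i]] += 1
--     return res
-- ===== Notes on version B (the rewrite author's own statement) =====
-- stated objective: alternative
-- what changed: Replaces the amortized two-pointer sweep over a mutable Counter by precomputed per-letter occurrence-index tables: for each left endpoint the minimal right endpoint is obtained directly by jumping to the needed k-th occurrence of each of Q/R/E/W, so there is no while-loop advancing a shared right pointer.
import Mathlib
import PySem

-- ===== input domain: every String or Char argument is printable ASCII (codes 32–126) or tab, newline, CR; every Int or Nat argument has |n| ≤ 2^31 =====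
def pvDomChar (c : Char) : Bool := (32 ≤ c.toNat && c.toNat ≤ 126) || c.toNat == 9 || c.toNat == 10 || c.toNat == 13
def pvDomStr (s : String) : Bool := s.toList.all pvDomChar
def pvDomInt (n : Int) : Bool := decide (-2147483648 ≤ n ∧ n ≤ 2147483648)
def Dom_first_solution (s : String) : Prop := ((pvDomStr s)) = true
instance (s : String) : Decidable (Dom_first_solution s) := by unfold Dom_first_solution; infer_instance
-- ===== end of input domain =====

-- B replaces A's two-pointer sweep over a mutable Counter by per-letter occurrence-index
-- tables (jump directly to the needed k-th occurrence); same value on every input, similar cost.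

-- ===== PORT A =====
-- chars = ('Q', 'R', 'E', 'W')
def pvChars : List Char := ['Q', 'R', 'E', 'W']

-- all(counter[char] <= target for char in chars)
def pvOkA (d : PySem.Dict Char Int) (t : Int) : Bool :=
  pvChars.all (fun c => d.getD c 0 ≤ t)

-- the inner while loop: while j < len(s) and not all(...): counter[s[j]] -= 1; j += 1
def pvWhileA (l : List Char) (t : Int) (d : PySem.Dict Char Int) (j : Nat) :
    PySem.Dict Char Int × Nat :=
  if h : j < l.length ∧ pvOkA d t = false then
    pvWhileA l t (d.modify (l[j]'h.1) 0 (· - 1)) (j + 1)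
  else (d, j)
termination_by l.length - j
decreasing_by omega

-- one iteration of the for-loop body (s[i] is always in range, so getD's default is never read)
def pvStepA (l : List Char) (t : Int)
    (st : PySem.Dict Char Int × Nat × Int) (i : Nat) :
    PySem.Dict Char Int × Nat × Int :=
  let dj := pvWhileA l t st.1 st.2.1
  let res' := if pvOkA dj.1 t then min st.2.2 ((dj.2 : Int) - (i : Int)) else st.2.2
  (dj.1.modify (l.getD i ' ') 0 (· + 1), dj.2, res')

def first_solution (s : String) : Int :=
  let l := s.toList
  let t := PySem.Int.floordiv (l.length : Int) 4
  ((List.range l.length).foldl (pvStepA l t) (PySem.Dict.counter l, 0, (l.length : Int))).2.2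

-- ===== PORT B =====
-- [k for k, ch in enumerate(s) if ch == c]
def pvOcc (l : List Char) (c : Char) : List Int :=
  ((PySem.List.enumerate l 0).filter (fun p => p.2 == c)).map (·.1)

-- body of `for (tot, pos), p in zip(occ, pref)` with state (j, feasible)
def pvInnerB (target : Int) (st : Int × Bool) (e : (Int × List Int) × Int) : Int × Bool :=
  let need := e.1.1 + e.2 - target
  if need > e.1.1 then (st.1, false)
  else if need > 0 then (max st.1 (PySem.List.pyGetD e.1.2 (need - 1) 0 + 1), st.2)
  else st

-- body of `for i in range(n)` with state (pref, res); pos[need-1] and s[i] are always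
-- in range, so the getD defaults are never read
def pvStepB (l : List Char) (target : Int) (occ : List (Int × List Int))
    (st : List Int × Int) (i : Nat) : List Int × Int :=
  let jf := (List.zip occ st.1).foldl (pvInnerB target) (0, true)
  let res' := if jf.2 then min st.2 (jf.1 - (i : Int)) else st.2
  let pref' := (List.zip pvChars st.1).map
    (fun cp => cp.2 + if l.getD i ' ' = cp.1 then 1 else 0)
  (pref', res')

def first_solution_alt (s : String) : Int :=
  let l := s.toList
  let target := PySem.Int.floordiv (l.length : Int) 4
  -- s.count(c) for the 1-character string c is the character count (exact)
  let occ := pvChars.map (fun c => ((l.count c : Int), pvOcc l c))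
  ((List.range l.length).foldl (pvStepB l target occ) ([0, 0, 0, 0], (l.length : Int))).2

-- ===== PRECONDITION & SPEC =====
def Spec_first_solution (s : String) (out : Int) : Prop := out = first_solution_alt s
instance (s : String) (out : Int) : Decidable (Spec_first_solution s out) := by unfold Spec_first_solution; infer_instance

-- ===== CLAIM (what is proved, stated in full; the proofs are below) =====
def Claim_equal_first_solution : Prop := ∀ (s : String), Dom_first_solution s → Spec_first_solution s (first_solution s)

-- ===== LEMMAS AND PROOFS =====

-- prefix count of c among the first j characters
def pvPC (l : List Char) (c : Char) (j : Nat) : Int := ((l.take j).count c : Int)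

-- "removing the window [i, j) leaves every tracked letter within the target"
def pvOkB (l : List Char) (t : Int) (i j : Nat) : Bool :=
  pvChars.all (fun c => (l.count c : Int) + pvPC l c i - pvPC l c j ≤ t)

theorem pvPC_nonneg (l : List Char) (c : Char) (j : Nat) : 0 ≤ pvPC l c j := by
  simp [pvPC]

theorem pvPC_mono (l : List Char) (c : Char) {j j' : Nat} (h : j ≤ j') :
    pvPC l c j ≤ pvPC l c j' := by
  unfold pvPC
  have h1 : l.take j = (l.take j').take j := by
    rw [List.take_take, Nat.min_eq_left h]
  rw [h1]
  exact_mod_cast (List.take_sublist j (l.take j')).count_le c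

theorem pvPC_succ (l : List Char) (c : Char) {j : Nat} (h : j < l.length) :
    pvPC l c (j + 1) = pvPC l c j + if l[j] = c then 1 else 0 := by
  unfold pvPC
  have h1 : (l.take (j + 1)).count c = (l.take j).count c + if l[j] = c then 1 else 0 := by
    rw [List.take_add_one, List.getElem?_eq_getElem h, List.count_append]
    by_cases hc : l[j] = c <;> simp [hc]
  rw [h1]
  by_cases hc : l[j] = c <;> simp [hc]

theorem pvPC_len (l : List Char) (c : Char) : pvPC l c l.length = (l.count c : Int) := by
  simp [pvPC]

theorem pvOkB_mono_j (l : List Char) (t : Int) {i j j' : Nat} (h : j ≤ j')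
    (hok : pvOkB l t i j = true) : pvOkB l t i j' = true := by
  simp only [pvOkB, List.all_eq_true, decide_eq_true_eq] at *
  intro c hc
  have h1 := hok c hc
  have h2 := pvPC_mono l c h
  omega

theorem pvOkB_anti_i (l : List Char) (t : Int) {i j : Nat}
    (hok : pvOkB l t (i + 1) j = true) : pvOkB l t i j = true := by
  simp only [pvOkB, List.all_eq_true, decide_eq_true_eq] at *
  intro c hc
  have h1 := hok c hc
  have h2 := pvPC_mono l c (Nat.le_succ i)
  simp only [Nat.succ_eq_add_one] at *
  omega

-- the reference result after i iterations of either loop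
def pvMres (l : List Char) (t : Int) : Nat → Int
  | 0 => l.length
  | i + 1 =>
    if h : pvOkB l t i l.length = true then
      min (pvMres l t i) ((Nat.find (⟨l.length, h⟩ : ∃ j, pvOkB l t i j = true) : Int) - i)
    else pvMres l t i

-- the Counter invariant: d holds total + prefix i - prefix j for every char
def pvDV (l : List Char) (d : PySem.Dict Char Int) (i j : Nat) : Prop :=
  ∀ c : Char, d.getD c 0 = (l.count c : Int) + pvPC l c i - pvPC l c j

theorem pvOkA_iff (l : List Char) (t : Int) (d : PySem.Dict Char Int) {i j : Nat}
    (hd : pvDV l d i j) : pvOkA d t = pvOkB l t i j := by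
  unfold pvOkA pvOkB
  congr 1
  funext c
  rw [hd c]

theorem pvWhileA_spec (l : List Char) (t : Int) (d : PySem.Dict Char Int) (i j : Nat)
    (hj : j ≤ l.length) (hd : pvDV l d i j) (hmin : ∀ k < j, pvOkB l t i k = false) :
    pvDV l (pvWhileA l t d j).1 i (pvWhileA l t d j).2 ∧
    j ≤ (pvWhileA l t d j).2 ∧ (pvWhileA l t d j).2 ≤ l.length ∧
    (∀ k < (pvWhileA l t d j).2, pvOkB l t i k = false) ∧
    (pvOkB l t i (pvWhileA l t d j).2 = true ∨ (pvWhileA l t d j).2 = l.length) := by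
  by_cases hcond : j < l.length ∧ pvOkA d t = false
  · have heq : pvWhileA l t d j = pvWhileA l t (d.modify (l[j]'hcond.1) 0 (· - 1)) (j + 1) := by
      rw [pvWhileA]
      rw [dif_pos hcond]
    have hd' : pvDV l (d.modify (l[j]'hcond.1) 0 (· - 1)) i (j + 1) := by
      intro c
      rw [PySem.Dict.getD_modify, pvPC_succ l c hcond.1]
      by_cases hc : c = l[j]'hcond.1
      · rw [if_pos hc, hc, hd (l[j]'hcond.1), if_pos rfl]
        ring
      · rw [if_neg hc, hd c, if_neg (fun h => hc h.symm)]
        ring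
    have hokj : pvOkB l t i j = false := by
      rw [← pvOkA_iff l t d hd]; exact hcond.2
    have hmin' : ∀ k < j + 1, pvOkB l t i k = false := by
      intro k hk
      rcases Nat.lt_succ_iff_lt_or_eq.mp hk with h | h
      · exact hmin k h
      · subst h; exact hokj
    have ih := pvWhileA_spec l t (d.modify (l[j]'hcond.1) 0 (· - 1)) i (j + 1) hcond.1 hd' hmin'
    rw [heq]
    exact ⟨ih.1, le_trans (Nat.le_succ j) ih.2.1, ih.2.2.1, ih.2.2.2.1, ih.2.2.2.2⟩
  · have heq : pvWhileA l t d j = (d, j) := by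
      rw [pvWhileA]
      rw [dif_neg hcond]
    rw [heq]
    refine ⟨hd, le_rfl, hj, hmin, ?_⟩
    rcases Nat.lt_or_ge j l.length with hlt | hge
    · left
      have h1 : ¬ pvOkA d t = false := fun hf => hcond ⟨hlt, hf⟩
      have h2 : pvOkA d t = true := by revert h1; cases pvOkA d t <;> simp
      rw [← pvOkA_iff l t d hd]; exact h2
    · right; omega
termination_by l.length - j
decreasing_by exact Nat.sub_succ_lt_self _ _ hcond.1

-- A's loop invariant
theorem pvLoopA_inv (l : List Char) (t : Int) (i : Nat) (hi : i ≤ l.length) :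
    pvDV l ((List.range i).foldl (pvStepA l t) (PySem.Dict.counter l, 0, (l.length : Int))).1
      i ((List.range i).foldl (pvStepA l t) (PySem.Dict.counter l, 0, (l.length : Int))).2.1 ∧
    ((List.range i).foldl (pvStepA l t) (PySem.Dict.counter l, 0, (l.length : Int))).2.1 ≤ l.length ∧
    (∀ k < ((List.range i).foldl (pvStepA l t) (PySem.Dict.counter l, 0, (l.length : Int))).2.1,
      pvOkB l t i k = false) ∧
    ((List.range i).foldl (pvStepA l t) (PySem.Dict.counter l, 0, (l.length : Int))).2.2 =
      pvMres l t i := by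
  induction i with
  | zero =>
    refine ⟨?_, by simp, by simp, rfl⟩
    intro c
    rw [List.range_zero, List.foldl_nil]
    show (PySem.Dict.counter l).getD c 0 = _
    rw [PySem.Dict.getD_counter]
    simp [pvPC]
  | succ i ih =>
    have hilt : i < l.length := hi
    obtain ⟨hDV, hjle, hmn, hres⟩ := ih (Nat.le_of_succ_le hi)
    rw [List.range_succ, List.foldl_append, List.foldl_cons, List.foldl_nil]
    set st := (List.range i).foldl (pvStepA l t) (PySem.Dict.counter l, 0, (l.length : Int)) with hst
    obtain ⟨wDV, wle, wlen, wmin, wok⟩ := pvWhileA_spec l t st.1 i st.2.1 hjle hDV hmn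
    simp only [pvStepA]
    set dj := pvWhileA l t st.1 st.2.1 with hdj
    have hgetd : l.getD i ' ' = l[i]'hilt := List.getD_eq_getElem l ' ' hilt
    refine ⟨?_, wlen, ?_, ?_⟩
    · intro c
      rw [hgetd, PySem.Dict.getD_modify, pvPC_succ l c hilt]
      by_cases hc : c = l[i]'hilt
      · rw [if_pos hc, hc, wDV (l[i]'hilt), if_pos rfl]
        ring
      · rw [if_neg hc, wDV c, if_neg (fun h => hc h.symm)]
        ring
    · intro k hk
      cases hko : pvOkB l t (i + 1) k with
      | false => rfl
      | true => exact absurd (pvOkB_anti_i l t hko) (by simp [wmin k hk])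
    · rw [pvOkA_iff l t dj.1 wDV, hres]
      by_cases hfeas : pvOkB l t i dj.2 = true
      · rw [if_pos hfeas]
        have hfn : pvOkB l t i l.length = true := pvOkB_mono_j l t wlen hfeas
        have hfind : Nat.find (⟨l.length, hfn⟩ : ∃ j, pvOkB l t i j = true) = dj.2 := by
          rw [Nat.find_eq_iff]
          exact ⟨hfeas, fun m hm => by simp [wmin m hm]⟩
        simp only [pvMres]
        rw [dif_pos hfn, hfind]
      · rw [if_neg hfeas]
        have hd2 : dj.2 = l.length := by
          rcases wok with h | h
          · exact absurd h hfeas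
          · exact h
        have hfn : ¬ pvOkB l t i l.length = true := by rw [← hd2]; exact hfeas
        simp only [pvMres]
        rw [dif_neg hfn]

-- occurrence lists over an appended element
theorem pvOcc_append (l : List Char) (a c : Char) :
    pvOcc (l ++ [a]) c = pvOcc l c ++ (if a = c then [(l.length : Int)] else []) := by
  unfold pvOcc
  rw [PySem.List.enumerate_append, List.filter_append, List.map_append]
  congr 1
  rw [PySem.List.enumerate_cons, PySem.List.enumerate_nil]
  by_cases hc : a = c <;> simp [hc]

-- occurrence lists: length and the k-th occurrence facts
theorem pvOcc_spec (l : List Char) (c : Char) :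
    (pvOcc l c).length = l.count c ∧
    ∀ k (hk : k < (pvOcc l c).length), ∃ q : Nat,
      (pvOcc l c)[k] = (q : Int) ∧ q < l.length ∧
      (l.take q).count c = k ∧ (l.take (q + 1)).count c = k + 1 := by
  induction l using List.reverseRecOn with
  | nil =>
    constructor
    · simp [pvOcc, PySem.List.enumerate_nil]
    · intro k hk
      simp [pvOcc, PySem.List.enumerate_nil] at hk
  | append_singleton l a ih =>
    obtain ⟨ihlen, ihk⟩ := ih
    by_cases hc : a = c
    · subst hc
      have hA : pvOcc (l ++ [a]) a = pvOcc l a ++ [(l.length : Int)] := by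
        rw [pvOcc_append, if_pos rfl]
      rw [hA]
      constructor
      · rw [List.length_append, List.count_append, ihlen]
        simp
      · intro k hk'
        rw [List.length_append, List.length_singleton] at hk'
        rcases Nat.lt_or_ge k (pvOcc l a).length with hlt | hge
        · obtain ⟨q, hq1, hq2, hq3, hq4⟩ := ihk k hlt
          refine ⟨q, ?_, ?_, ?_, ?_⟩
          · rw [List.getElem_append_left hlt]
            exact hq1
          · rw [List.length_append, List.length_singleton]
            omega
          · rw [List.take_append_of_le_length (by omega)]
            exact hq3
          · rw [List.take_append_of_le_length (by omega)]
            exact hq4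
        · have hk0 : k = (pvOcc l a).length := by omega
          refine ⟨l.length, ?_, ?_, ?_, ?_⟩
          · rw [List.getElem_append_right (by omega)]
            simp [hk0]
          · rw [List.length_append, List.length_singleton]
            omega
          · rw [List.take_append_of_le_length le_rfl, List.take_length]
            omega
          · rw [show l.length + 1 = (l ++ [a]).length by simp, List.take_length,
                List.count_append, List.count_singleton]
            simp
            omega
    · have hA : pvOcc (l ++ [a]) c = pvOcc l c := by
        rw [pvOcc_append, if_neg hc, List.append_nil]
      rw [hA]
      constructor
      · rw [ihlen, List.count_append, List.count_singleton]
        simp [hc]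
      · intro k hk'
        obtain ⟨q, hq1, hq2, hq3, hq4⟩ := ihk k hk'
        refine ⟨q, hq1, ?_, ?_, ?_⟩
        · rw [List.length_append, List.length_singleton]
          omega
        · rw [List.take_append_of_le_length (by omega)]
          exact hq3
        · rw [List.take_append_of_le_length (by omega)]
          exact hq4

-- the inner fold of B computes feasibility and (when feasible) the least balancing j
theorem pvInnerB_spec (l : List Char) (t : Int) (i : Nat) :
    ∀ (L : List Char) (j₀ : Int) (f₀ : Bool), 0 ≤ j₀ → j₀ ≤ (l.length : Int) →
    ((List.zip (L.map fun c => ((l.count c : Int), pvOcc l c)) (L.map fun c => pvPC l c i)).foldl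
        (pvInnerB t) (j₀, f₀)).2 = (f₀ && L.all fun c => decide (pvPC l c i ≤ t)) ∧
    j₀ ≤ ((List.zip (L.map fun c => ((l.count c : Int), pvOcc l c)) (L.map fun c => pvPC l c i)).foldl
        (pvInnerB t) (j₀, f₀)).1 ∧
    ((List.zip (L.map fun c => ((l.count c : Int), pvOcc l c)) (L.map fun c => pvPC l c i)).foldl
        (pvInnerB t) (j₀, f₀)).1 ≤ (l.length : Int) ∧
    (∀ c ∈ L, pvPC l c i ≤ t → (l.count c : Int) + pvPC l c i - t ≤
      pvPC l c ((List.zip (L.map fun c => ((l.count c : Int), pvOcc l c)) (L.map fun c => pvPC l c i)).foldl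
        (pvInnerB t) (j₀, f₀)).1.toNat) ∧
    (∀ k : Nat, (k : Int) < ((List.zip (L.map fun c => ((l.count c : Int), pvOcc l c)) (L.map fun c => pvPC l c i)).foldl
        (pvInnerB t) (j₀, f₀)).1 → (k : Int) < j₀ ∨
      ∃ c ∈ L, pvPC l c k < (l.count c : Int) + pvPC l c i - t) := by
  intro L
  induction L with
  | nil =>
    intro j₀ f₀ h0 hn
    refine ⟨by simp, by simp, by simpa using hn, by simp, ?_⟩
    intro k hk
    left
    simpa using hk
  | cons c L ihL =>
    intro j₀ f₀ h0 hn
    simp only [List.map_cons, List.zip_cons_cons, List.foldl_cons]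
    by_cases h1 : (l.count c : Int) + pvPC l c i - t > (l.count c : Int)
    · have hstep : pvInnerB t (j₀, f₀) (((l.count c : Int), pvOcc l c), pvPC l c i)
          = (j₀, false) := by
        simp only [pvInnerB]
        rw [if_pos h1]
      rw [hstep]
      obtain ⟨r2, rge, rle, rper, rmin⟩ := ihL j₀ false h0 hn
      have hpc : ¬ (pvPC l c i ≤ t) := by omega
      refine ⟨?_, rge, rle, ?_, ?_⟩
      · rw [r2]
        simp [hpc]
      · intro c' hc' hle
        rcases List.mem_cons.mp hc' with h | h
        · subst h
          exact absurd hle hpc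
        · exact rper c' h hle
      · intro k hk
        rcases rmin k hk with h | ⟨c', hc', hlt⟩
        · exact Or.inl h
        · exact Or.inr ⟨c', List.mem_cons_of_mem c hc', hlt⟩
    · by_cases h2 : (l.count c : Int) + pvPC l c i - t > 0
      · have hlen := (pvOcc_spec l c).1
        have hkn : ((l.count c : Int) + pvPC l c i - t - 1).toNat < (pvOcc l c).length := by
          rw [hlen]
          omega
        obtain ⟨q, hq1, hq2, hq3, hq4⟩ := (pvOcc_spec l c).2 _ hkn
        have hget : PySem.List.pyGetD (pvOcc l c) ((l.count c : Int) + pvPC l c i - t - 1) 0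
            = (q : Int) := by
          rw [PySem.List.pyGetD_of_nonneg _ _ (by omega), List.getD_eq_getElem _ _ hkn]
          exact hq1
        have hstep : pvInnerB t (j₀, f₀) (((l.count c : Int), pvOcc l c), pvPC l c i)
            = (max j₀ ((q : Int) + 1), f₀) := by
          simp only [pvInnerB]
          rw [if_neg h1, if_pos h2, hget]
        rw [hstep]
        have hq2' : ((q : Int) + 1) ≤ (l.length : Int) := by exact_mod_cast hq2
        obtain ⟨r2, rge, rle, rper, rmin⟩ :=
          ihL (max j₀ ((q : Int) + 1)) f₀ (le_trans h0 (le_max_left _ _)) (max_le hn hq2')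
        have hpcq1 : pvPC l c (q + 1) = (l.count c : Int) + pvPC l c i - t := by
          have e1 : pvPC l c (q + 1)
              = ((((l.count c : Int) + pvPC l c i - t - 1).toNat + 1 : Nat) : Int) := by
            show ((List.count c (List.take (q + 1) l) : Nat) : Int) = _
            rw [hq4]
          rw [e1]
          push_cast
          omega
        have hpcq : pvPC l c q = (l.count c : Int) + pvPC l c i - t - 1 := by
          have e1 : pvPC l c q
              = ((((l.count c : Int) + pvPC l c i - t - 1).toNat : Nat) : Int) := by
            show ((List.count c (List.take q l) : Nat) : Int) = _
            rw [hq3]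
          rw [e1]
          omega
        refine ⟨?_, le_trans (le_max_left _ _) rge, rle, ?_, ?_⟩
        · rw [r2]
          have hple : pvPC l c i ≤ t := by omega
          simp [hple]
        · intro c' hc' hle
          rcases List.mem_cons.mp hc' with h | h
          · subst h
            have hr1 : ((q : Int) + 1) ≤ _ := le_trans (le_max_right j₀ _) rge
            have hrn : q + 1 ≤ (((List.zip (L.map fun c => ((l.count c : Int), pvOcc l c))
                (L.map fun c => pvPC l c i)).foldl (pvInnerB t)
                (max j₀ ((q : Int) + 1), f₀)).1).toNat := by omega
            calc (l.count c' : Int) + pvPC l c' i - t = pvPC l c' (q + 1) := hpcq1.symm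
              _ ≤ _ := pvPC_mono l c' hrn
          · exact rper c' h hle
        · intro k hk
          rcases rmin k hk with h | ⟨c', hc', hlt⟩
          · rcases lt_max_iff.mp h with h' | h'
            · exact Or.inl h'
            · refine Or.inr ⟨c, List.mem_cons_self .., ?_⟩
              have hkq : k ≤ q := by omega
              have hm := pvPC_mono l c hkq
              omega
          · exact Or.inr ⟨c', List.mem_cons_of_mem c hc', hlt⟩
      · have hstep : pvInnerB t (j₀, f₀) (((l.count c : Int), pvOcc l c), pvPC l c i)
            = (j₀, f₀) := by
          simp only [pvInnerB]
          rw [if_neg h1, if_neg h2]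
        rw [hstep]
        obtain ⟨r2, rge, rle, rper, rmin⟩ := ihL j₀ f₀ h0 hn
        refine ⟨?_, rge, rle, ?_, ?_⟩
        · rw [r2]
          have hple : pvPC l c i ≤ t := by omega
          simp [hple]
        · intro c' hc' hle
          rcases List.mem_cons.mp hc' with h | h
          · subst h
            have hnn := pvPC_nonneg l c' (((List.zip (L.map fun c => ((l.count c : Int), pvOcc l c))
                (L.map fun c => pvPC l c i)).foldl (pvInnerB t) (j₀, f₀)).1).toNat
            omega
          · exact rper c' h hle
        · intro k hk
          rcases rmin k hk with h | ⟨c', hc', hlt⟩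
          · exact Or.inl h
          · exact Or.inr ⟨c', List.mem_cons_of_mem c hc', hlt⟩

-- B's loop invariant
theorem pvLoopB_inv (l : List Char) (t : Int) (i : Nat) (hi : i ≤ l.length) :
    ((List.range i).foldl (pvStepB l t (pvChars.map (fun c => ((l.count c : Int), pvOcc l c))))
        ([0, 0, 0, 0], (l.length : Int))).1 = pvChars.map (fun c => pvPC l c i) ∧
    ((List.range i).foldl (pvStepB l t (pvChars.map (fun c => ((l.count c : Int), pvOcc l c))))
        ([0, 0, 0, 0], (l.length : Int))).2 = pvMres l t i := by
  induction i with
  | zero =>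
    constructor
    · rw [List.range_zero, List.foldl_nil]
      simp [pvChars, pvPC]
    · rfl
  | succ i ih =>
    have hilt : i < l.length := hi
    obtain ⟨hpref, hres⟩ := ih (Nat.le_of_succ_le hi)
    rw [List.range_succ, List.foldl_append, List.foldl_cons, List.foldl_nil]
    set st := (List.range i).foldl
      (pvStepB l t (pvChars.map (fun c => ((l.count c : Int), pvOcc l c))))
      ([0, 0, 0, 0], (l.length : Int)) with hst
    simp only [pvStepB]
    rw [hpref]
    obtain ⟨hf, hge0, hlen, hper, hmin⟩ :=
      pvInnerB_spec l t i pvChars 0 true le_rfl (Int.natCast_nonneg _)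
    set jf := ((List.zip (pvChars.map fun c => ((l.count c : Int), pvOcc l c))
        (pvChars.map fun c => pvPC l c i)).foldl (pvInnerB t) (0, true)) with hjf
    have hOkn : pvOkB l t i l.length = (pvChars.all fun c => decide (pvPC l c i ≤ t)) := by
      unfold pvOkB
      congr 1
      funext c
      rw [pvPC_len]
      exact decide_eq_decide.mpr (by omega)
    constructor
    · have hgen : ∀ c : Char, (pvPC l c i + if l[i]?.getD ' ' = c then 1 else 0)
          = pvPC l c (i + 1) := by
        intro c
        rw [List.getElem?_eq_getElem hilt]
        show (pvPC l c i + if l[i]'hilt = c then 1 else 0) = _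
        rw [pvPC_succ l c hilt]
      simp [pvChars]
      exact ⟨hgen 'Q', hgen 'R', hgen 'E', hgen 'W'⟩
    · by_cases hfeas : pvOkB l t i l.length = true
      · have hjt : jf.2 = true := by
          rw [hf, Bool.true_and, ← hOkn]
          exact hfeas
        rw [if_pos hjt]
        have hokj : pvOkB l t i jf.1.toNat = true := by
          unfold pvOkB
          rw [List.all_eq_true]
          intro c hc
          rw [decide_eq_true_eq]
          have h1 := hper c hc (by
            rw [hOkn, List.all_eq_true] at hfeas
            have h2 := hfeas c hc
            rwa [decide_eq_true_eq] at h2)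
          omega
        have hmlt : ∀ m : Nat, m < jf.1.toNat → ¬ pvOkB l t i m = true := by
          intro m hm
          rcases hmin m (by omega) with h | ⟨c', hc', hlt⟩
          · exact absurd h (by omega)
          · intro hok
            unfold pvOkB at hok
            rw [List.all_eq_true] at hok
            have h3 := hok c' hc'
            rw [decide_eq_true_eq] at h3
            omega
        have hfind : Nat.find (⟨l.length, hfeas⟩ : ∃ j, pvOkB l t i j = true) = jf.1.toNat := by
          rw [Nat.find_eq_iff]
          exact ⟨hokj, hmlt⟩
        simp only [pvMres]
        rw [dif_pos hfeas, hfind, hres, Int.toNat_of_nonneg hge0]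
      · have hjt : jf.2 = false := by
          rw [hf, Bool.true_and, ← hOkn]
          cases h : pvOkB l t i l.length
          · rfl
          · exact absurd h hfeas
        rw [if_neg (by simp [hjt])]
        simp only [pvMres]
        rw [dif_neg hfeas, hres]

-- ===== VERDICT (by name: the statement is the Claim_ definition above) =====
theorem first_solution_spec : Claim_equal_first_solution := by
  intro s _
  unfold Spec_first_solution
  simp only [first_solution, first_solution_alt]
  have hA := (pvLoopA_inv s.toList (PySem.Int.floordiv (s.toList.length : Int) 4)
      s.toList.length le_rfl).2.2.2
  have hB := (pvLoopB_inv s.toList (PySem.Int.floordiv (s.toList.length : Int) 4)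
      s.toList.length le_rfl).2
  rw [hA, hB]
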